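-- pv_equiv track=rewrite | github.com/miliar/Code_Jam_Webscraper | solutions_python/Problem_123/462.py | absorb
-- ===== SOURCE A (Python) =====
-- def absorb(A, N, motes):
--     if A < 2: return N
--     motes.sort(reverse = True)
--     ops = []
--     while motes:
--         ops.append(0)
--         while motes[-1] >= A:
--             A       += A - 1
--             ops[-1] += 1
--         A += motes.pop()
--     l, add, rem = N, 0, 0
--     for n in range(N - 1, -1, -1):
--         r = l - n
--         if ops[n] + add > r:
--             l, add = n, 0
--             rem   += r
--         else: add += ops[n]
--     return add + rem
-- ===== SOURCE B (Python) =====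
-- # Single forward greedy pass with a running minimum, instead of A's ops-table +
-- # backward reconciliation. Return-value equivalence only: A empties `motes` in
-- # place (when A >= 2); B does not mutate it.
-- def absorb(A, N, motes):
--     if A < 2:
--         return N
--     best = N                 # removing every mote always works
--     added = 0
--     size = A
--     rest = N
--     for m in sorted(motes)[:N]:
--         if m >= size:
--             best = min(best, added + rest)
--             while m >= size:
--                 size += size - 1
--                 added += 1
--         size += m
--         rest -= 1
--     return min(best, added)
-- ===== Notes on version B (the rewrite author's own statement) =====
-- stated objective: simpler
-- what changed: Replaces A's two-phase scheme (build an ops table by popping a descending sort, then a backward reconciliation loop choosing add-vs-remove) by the canonical single forward greedy pass over the ascending motes that keeps a running minimum of 'adds so far + remaining motes'.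
-- outside the precondition, e.g. on absorb(2, -1, [1]): A returns 0, B returns -1; on absorb(2, 1, [-5]): A returns 0, B returns 0
import Mathlib
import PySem

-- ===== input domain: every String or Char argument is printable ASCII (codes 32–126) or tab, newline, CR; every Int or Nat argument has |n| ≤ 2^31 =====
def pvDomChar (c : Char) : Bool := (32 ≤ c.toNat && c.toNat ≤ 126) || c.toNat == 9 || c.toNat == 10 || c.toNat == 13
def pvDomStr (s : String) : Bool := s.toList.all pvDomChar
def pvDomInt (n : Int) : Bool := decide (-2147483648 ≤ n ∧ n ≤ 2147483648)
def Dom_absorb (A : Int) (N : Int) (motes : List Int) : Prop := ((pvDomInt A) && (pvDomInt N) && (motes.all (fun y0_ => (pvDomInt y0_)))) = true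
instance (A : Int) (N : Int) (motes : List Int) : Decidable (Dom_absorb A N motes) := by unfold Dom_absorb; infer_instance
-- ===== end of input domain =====

-- B replaces A's ops-table + backward reconciliation by one forward greedy pass with a
-- running minimum (objective: simpler).  Return-value equivalence only: Python A empties
-- `motes` in place when A ≥ 2; Python B does not mutate it.

-- ===== PORT A =====

-- `while motes[-1] >= A: A += A - 1; ops[-1] += 1`  — returns (ops[-1] increment, new A).
-- Fuel 128 is exhausted only outside Pre_absorb (there |mote| ≤ 2^31 and A ≥ 2, so < 64 steps).
def pvGrow : Nat → Int → Int → Int × Int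
  | 0, sz, _ => (0, sz)
  | Nat.succ f, sz, m =>
      if sz ≤ m then
        let p := pvGrow f (sz + (sz - 1)) m
        (p.1 + 1, p.2)
      else (0, sz)

-- the `while motes:` loop: pop from the end of the descending list, collect ops in order
def absorbBuild (motes : List Int) (a : Int) : List Int :=
  match h : motes.getLast? with
  | none => []
  | some m =>
      let p := pvGrow 128 a m
      p.1 :: absorbBuild motes.dropLast (p.2 + m)
termination_by motes.length
decreasing_by
  have hne : motes ≠ [] := by intro he; rw [he] at h; simp at h
  simp [List.length_dropLast]
  exact List.length_pos_of_ne_nil hne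

-- `for n in range(N-1, -1, -1)` with state (l, add, rem); t = number of iterations left,
-- current index n = t-1.  ops[n] is ported as getD (exact under Pre_: 0 ≤ n < len ops).
def absorbBack (ops : List Int) : Nat → Int → Int → Int → Int
  | 0, _, add, rem => add + rem
  | Nat.succ n, l, add, rem =>
      let o := ops.getD n 0
      let r := l - (n : Int)
      if o + add > r then absorbBack ops n (n : Int) 0 (rem + r)
      else absorbBack ops n l (add + o) rem

def absorb (A : Int) (N : Int) (motes : List Int) : Int :=
  if A < 2 then N
  else
    let ops := absorbBuild (PySem.List.sorted motes (fun x => x) true) A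
    absorbBack ops N.toNat N 0 0

-- ===== PORT B =====

-- one forward pass over the ascending motes: state (size, added, best, rest)
def absorbScan : List Int → Int → Int → Int → Int → Int
  | [], _, added, best, _ => min best added
  | m :: t, size, added, best, rest =>
      if size ≤ m then
        let best' := min best (added + rest)
        let p := pvGrow 128 size m
        absorbScan t (p.2 + m) (added + p.1) best' (rest - 1)
      else absorbScan t (size + m) added best (rest - 1)

def absorb_alt (A : Int) (N : Int) (motes : List Int) : Int :=
  if A < 2 then N
  else absorbScan (PySem.List.slice (PySem.List.sorted motes (fun x => x) false) none (some N)) A 0 N N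

-- ===== PRECONDITION & SPEC =====
-- Pre_ excludes: N > len(motes), where A raises IndexError; N < 0 and negative motes,
-- on (some of) which A still returns but can also loop forever (A's while loop diverges
-- once its size drops below 2, which only negative motes can cause) — see claim cites.
def Pre_absorb (A : Int) (N : Int) (motes : List Int) : Prop :=
  A < 2 ∨ (0 ≤ N ∧ N ≤ motes.length ∧ ∀ m ∈ motes, 0 ≤ m)
instance (A : Int) (N : Int) (motes : List Int) : Decidable (Pre_absorb A N motes) := by
  unfold Pre_absorb; infer_instance

def pvWitness_absorb : Int × Int × List Int := (2, 3, [1, 1, 4])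

def Spec_absorb (A : Int) (N : Int) (motes : List Int) (out : Int) : Prop := out = absorb_alt A N motes
instance (A : Int) (N : Int) (motes : List Int) (out : Int) : Decidable (Spec_absorb A N motes out) := by unfold Spec_absorb; infer_instance

-- ===== CLAIM (what is proved, stated in full; the proofs are below) =====
def Claim_equal_absorb : Prop := ∀ (A : Int) (N : Int) (motes : List Int), Dom_absorb A N motes → Pre_absorb A N motes → Spec_absorb A N motes (absorb A N motes)

-- ===== LEMMAS AND PROOFS =====

-- forward version of A's ops construction (over the ascending list)
def opsF : List Int → Int → List Int
  | [], _ => []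
  | m :: t, s =>
      let p := pvGrow 128 s m
      p.1 :: opsF t (p.2 + m)

-- gmin xs = min over 0 ≤ k ≤ len xs of (sum of first k) - k
def gmin : List Int → Int
  | [] => 0
  | o :: t => min 0 (o - 1 + gmin t)

theorem gmin_nonpos (xs : List Int) : gmin xs ≤ 0 := by
  cases xs with
  | nil => simp [gmin]
  | cons o t => simp [gmin]

theorem gmin_le (xs : List Int) : gmin xs ≤ xs.sum - xs.length := by
  induction xs with
  | nil => simp [gmin]
  | cons o t ih => simp only [gmin, List.sum_cons, List.length_cons]; push_cast; omega

theorem gmin_concat (ys : List Int) (o : Int) :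
    gmin (ys ++ [o]) = min (gmin ys) (ys.sum + o - (ys.length + 1)) := by
  induction ys with
  | nil => simp [gmin]
  | cons y t ih => simp only [List.cons_append, gmin, ih, List.sum_cons, List.length_cons]; push_cast; omega

theorem build_rev (xs : List Int) : ∀ s : Int, absorbBuild xs.reverse s = opsF xs s := by
  induction xs with
  | nil => intro s; rw [absorbBuild.eq_def]; rfl
  | cons a t ih =>
      intro s
      rw [absorbBuild.eq_def]
      split
      next hnone =>
        rw [List.reverse_cons, List.getLast?_concat] at hnone
        exact absurd hnone (by simp)
      next x hsome =>
        rw [List.reverse_cons, List.getLast?_concat] at hsome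
        have hx : x = a := by injection hsome with h'; exact h'.symm
        have hd : (a :: t).reverse.dropLast = t.reverse := by
          rw [List.reverse_cons, List.dropLast_concat]
        rw [hx, hd]
        simp only [ih]
        rfl

theorem desc_eq_rev (motes : List Int) :
    PySem.List.sorted motes (fun x => x) true = (PySem.List.sorted motes (fun x => x) false).reverse := by
  have hperm : ((PySem.List.sorted motes (fun x => x) true).reverse).Perm
      (PySem.List.sorted motes (fun x => x) false) :=
    ((List.reverse_perm _).trans (PySem.List.sorted_perm motes (fun x => x) true)).trans
      (PySem.List.sorted_perm motes (fun x => x) false).symm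
  have h1 : (PySem.List.sorted motes (fun x => x) true).reverse
      = PySem.List.sorted motes (fun x => x) false :=
    List.Perm.eq_of_pairwise (fun a b _ _ hab hba => le_antisymm hab hba)
      (by rw [List.pairwise_reverse]; exact PySem.List.sorted_pairwise_rev motes (fun x => x))
      (PySem.List.sorted_pairwise motes (fun x => x)) hperm
  rw [← h1, List.reverse_reverse]

theorem opsF_length (xs : List Int) : ∀ s, (opsF xs s).length = xs.length := by
  induction xs with
  | nil => intro s; simp [opsF]
  | cons m t ih => intro s; simp [opsF, ih]

theorem opsF_take (xs : List Int) : ∀ (k : Nat) (s : Int), opsF (xs.take k) s = (opsF xs s).take k := by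
  induction xs with
  | nil => intro k s; simp [opsF]
  | cons m t ih =>
      intro k s
      cases k with
      | zero => simp [opsF]
      | succ j => simp [opsF, ih]

theorem pvGrow_stop (f : Nat) (s m : Int) (h : ¬ s ≤ m) : pvGrow f s m = (0, s) := by
  cases f with
  | zero => rfl
  | succ g => simp [pvGrow, h]

theorem gmin_take_succ (os : List Int) (t : Nat) (h : t < os.length) :
    gmin (os.take (t + 1)) = min (gmin (os.take t)) ((os.take (t + 1)).sum - (t + 1)) := by
  have htk : os.take (t + 1) = os.take t ++ [os[t]] := by
    rw [List.take_succ]; simp [List.getElem?_eq_getElem h]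
  rw [htk, gmin_concat, List.sum_append, List.length_take_of_le (Nat.le_of_lt h)]
  simp

-- minimum the backward loop still can achieve: f(l)=sum(take l)-l joined with all f(k), k < t
def mprev (os : List Int) (ln : Nat) : Nat → Int
  | 0 => (os.take ln).sum - ln
  | Nat.succ u => min ((os.take ln).sum - ln) (gmin (os.take u))

theorem mprev_self (os : List Int) (t : Nat) (h : t ≤ os.length) :
    mprev os t t = gmin (os.take t) := by
  cases t with
  | zero => simp [mprev, gmin]
  | succ u =>
      rw [mprev, gmin_take_succ os u (by omega)]
      omega

theorem back_eq (os : List Int) :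
    ∀ (t ln : Nat), t ≤ ln → ln ≤ os.length → ∀ rem : Int,
      absorbBack os t (ln : Int) ((os.take ln).sum - (os.take t).sum) rem
        = rem + ln + mprev os ln t := by
  intro t
  induction t with
  | zero => intro ln _ _ rem; simp [absorbBack, mprev]; ring
  | succ u ih =>
      intro ln hle hlen rem
      have hu : u < os.length := by omega
      have hget : os.getD u 0 = os[u] := List.getD_eq_getElem os 0 hu
      have hsum : (os.take (u + 1)).sum = (os.take u).sum + os[u] := List.sum_take_succ os u hu
      rw [absorbBack]
      simp only [hget]
      by_cases hc : os[u] + ((os.take ln).sum - (os.take (u + 1)).sum) > (ln : Int) - (u : Int)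
      · rw [if_pos hc]
        have h0 : (0 : Int) = (os.take u).sum - (os.take u).sum := by ring
        rw [h0, ih u (le_refl u) (by omega) (rem + ((ln : Int) - (u : Int)))]
        rw [mprev_self os u (by omega)]
        -- the reset point u strictly improves on ln
        have hlt : (os.take u).sum - (u : Int) < (os.take ln).sum - (ln : Int) := by omega
        have hgle : gmin (os.take u) ≤ (os.take u).sum - (u : Int) := by
          have := gmin_le (os.take u)
          rwa [List.length_take_of_le (Nat.le_of_lt hu)] at this
        simp only [mprev]
        omega
      · rw [if_neg hc]
        have hadd : (os.take ln).sum - (os.take (u + 1)).sum + os[u]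
            = (os.take ln).sum - (os.take u).sum := by omega
        rw [hadd, ih ln (by omega) hlen rem]
        have hge : (os.take ln).sum - (ln : Int) ≤ (os.take u).sum - (u : Int) := by omega
        cases u with
        | zero =>
            simp only [mprev, gmin, List.take_zero, List.sum_nil] at hge ⊢
            omega
        | succ v =>
            rw [mprev, mprev, gmin_take_succ os v (by omega)]
            omega

theorem scan_eq (ms : List Int) :
    ∀ (s add best : Int),
      absorbScan ms s add best (ms.length : Int)
        = min best (add + ms.length + gmin (opsF ms s)) := by
  induction ms with
  | nil => intro s add best; simp [absorbScan, opsF, gmin]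
  | cons m t ih =>
      intro s add best
      rw [absorbScan]
      by_cases hc : s ≤ m
      · rw [if_pos hc]
        have hr : ((m :: t).length : Int) - 1 = (t.length : Int) := by simp
        rw [hr, ih]
        simp only [opsF, gmin, List.length_cons]
        have hG := gmin_nonpos (opsF t ((pvGrow 128 s m).2 + m))
        push_cast
        omega
      · rw [if_neg hc]
        have hp : pvGrow 128 s m = (0, s) := pvGrow_stop 128 s m hc
        have hr : ((m :: t).length : Int) - 1 = (t.length : Int) := by simp
        rw [hr, ih]
        simp only [opsF, hp, gmin, List.length_cons]
        have hG := gmin_nonpos (opsF t (s + m))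
        push_cast
        omega

theorem back_eq0 (os : List Int) (n : Nat) (h : n ≤ os.length) :
    absorbBack os n (n : Int) 0 0 = (n : Int) + gmin (os.take n) := by
  have hb := back_eq os n n (le_refl n) h 0
  rw [mprev_self os n h] at hb
  simpa using hb

-- ===== VERDICT (by name: the statement is the Claim_ definition above) =====
theorem absorb_spec : Claim_equal_absorb := by
  intro A N motes _ hpre
  unfold Spec_absorb
  by_cases hA : A < 2
  · simp [absorb, absorb_alt, hA]
  · rcases hpre with h | ⟨h0, hlen, _⟩
    · exact absurd h hA
    · have hN : ((N.toNat : Int)) = N := Int.toNat_of_nonneg h0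
      have hlenS : (PySem.List.sorted motes (fun x => x) false).length = motes.length :=
        List.Perm.length_eq (PySem.List.sorted_perm motes (fun x => x) false)
      have hNlen : N.toNat ≤ motes.length := by omega
      have hops : absorbBuild (PySem.List.sorted motes (fun x => x) true) A
          = opsF (PySem.List.sorted motes (fun x => x) false) A := by
        rw [desc_eq_rev]
        exact build_rev _ A
      have hlenOps : (opsF (PySem.List.sorted motes (fun x => x) false) A).length
          = motes.length := by rw [opsF_length, hlenS]
      have hA1 : absorb A N motes
          = N + gmin ((opsF (PySem.List.sorted motes (fun x => x) false) A).take N.toNat) := by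
        unfold absorb
        rw [if_neg hA]
        show absorbBack (absorbBuild (PySem.List.sorted motes (fun x => x) true) A)
            N.toNat N 0 0 = _
        rw [hops, ← hN]
        exact back_eq0 _ N.toNat (by omega)
      have hB1 : absorb_alt A N motes
          = min N (N + gmin ((opsF (PySem.List.sorted motes (fun x => x) false) A).take N.toNat)) := by
        unfold absorb_alt
        rw [if_neg hA, PySem.List.slice_to _ h0]
        have hlt : (List.take N.toNat (PySem.List.sorted motes (fun x => x) false)).length
            = N.toNat := List.length_take_of_le (by omega)
        have hs := scan_eq (List.take N.toNat (PySem.List.sorted motes (fun x => x) false))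
          A 0 ((N.toNat : Int))
        rw [hlt] at hs
        rw [← hN]
        simp only [Int.toNat_natCast]
        rw [hs, opsF_take]
        omega
      rw [hA1, hB1]
      have := gmin_nonpos ((opsF (PySem.List.sorted motes (fun x => x) false) A).take N.toNat)
      omega
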